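-- pv_equiv track=rewrite | github.com/Thanhha456/Yahtzee_Game | yahtzee_game.py | gen_all_sequences
-- ===== SOURCE A (Python) =====
-- def gen_all_sequences(outcomes, length):
--     """
--     Iterative function that enumerates the set of all sequences of
--     outcomes of given length.
--     """
--
--     answer_set = set([()])
--     for dummy_idx in range(length):
--         temp_set = set()
--         for partial_sequence in answer_set:
--             for item in outcomes:
--                 new_sequence = list(partial_sequence)
--                 new_sequence.append(item)
--                 temp_set.add(tuple(new_sequence))
--         answer_set = temp_set
--     return answer_set
-- ===== SOURCE B (Python) =====
-- def gen_all_sequences(outcomes, length):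
--     """Recursive enumeration of all outcome sequences of the given length."""
--     if length <= 0:
--         return set([()])
--     rest = gen_all_sequences(outcomes, length - 1)
--     return {partial + (item,) for partial in rest for item in outcomes}
-- ===== Notes on version B (the rewrite author's own statement) =====
-- stated objective: simpler
-- what changed: Replaces the iterative loop that rebuilds an accumulator set length times with a direct recursion on length whose step is a single set comprehension.
import Mathlib
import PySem

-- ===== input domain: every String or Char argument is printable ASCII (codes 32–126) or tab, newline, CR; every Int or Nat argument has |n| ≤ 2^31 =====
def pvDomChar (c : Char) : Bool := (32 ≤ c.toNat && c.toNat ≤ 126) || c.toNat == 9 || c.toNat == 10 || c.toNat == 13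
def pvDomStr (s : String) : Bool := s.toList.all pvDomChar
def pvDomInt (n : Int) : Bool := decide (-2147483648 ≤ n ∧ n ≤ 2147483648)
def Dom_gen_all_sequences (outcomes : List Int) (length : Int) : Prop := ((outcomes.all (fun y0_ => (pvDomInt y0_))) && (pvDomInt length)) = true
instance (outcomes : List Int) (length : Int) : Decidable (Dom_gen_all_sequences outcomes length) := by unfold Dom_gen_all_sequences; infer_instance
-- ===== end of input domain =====

-- B replaces A's iterative accumulator loop by a direct recursion on length with a set-comprehension step; same values, same cost.

-- ===== PORT A =====
-- A: answer_set = {()}; for _ in range(length): temp = set(); for partial in answer_set: for item in outcomes: temp.add(partial+(item,)); answer_set = temp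
def gen_all_sequences (outcomes : List Int) (length : Int) : List (List Int) :=
  (PySem.List.pyRange 0 length 1).foldl
    (fun answer_set _ =>
      answer_set.foldl
        (fun temp_set partial_sequence =>
          outcomes.foldl
            (fun temp_set item => PySem.Set.add temp_set (partial_sequence ++ [item]))
            temp_set)
        PySem.Set.empty)
    (PySem.Set.ofList [([] : List Int)])

-- ===== PORT B =====
-- B: if length <= 0: return {()}; rest = gen(length-1); return {partial+(item,) for partial in rest for item in outcomes}
def gen_all_sequences_alt (outcomes : List Int) (length : Int) : List (List Int) :=
  if length ≤ 0 then PySem.Set.ofList [([] : List Int)]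
  else
    PySem.Set.ofList
      ((gen_all_sequences_alt outcomes (length - 1)).flatMap
        (fun partial_sequence => outcomes.map (fun item => partial_sequence ++ [item])))
termination_by length.toNat
decreasing_by omega

-- ===== PRECONDITION & SPEC =====
def Spec_gen_all_sequences (outcomes : List Int) (length : Int) (out : List (List Int)) : Prop := out = gen_all_sequences_alt outcomes length
instance (outcomes : List Int) (length : Int) (out : List (List Int)) : Decidable (Spec_gen_all_sequences outcomes length out) := by unfold Spec_gen_all_sequences; infer_instance

-- ===== CLAIM (what is proved, stated in full; the proofs are below) =====
def Claim_equal_gen_all_sequences : Prop := ∀ (outcomes : List Int) (length : Int), Dom_gen_all_sequences outcomes length → Spec_gen_all_sequences outcomes length (gen_all_sequences outcomes length)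

-- ===== LEMMAS AND PROOFS =====

-- A's one loop iteration (nested foldl of Set.add) equals B's comprehension step (ofList of a flatMap).
theorem step_eq (outcomes : List Int) (s init : List (List Int)) :
    s.foldl
      (fun temp_set partial_sequence =>
        outcomes.foldl
          (fun temp_set item => PySem.Set.add temp_set (partial_sequence ++ [item]))
          temp_set)
      init
    = (s.flatMap (fun p => outcomes.map (fun i => p ++ [i]))).foldl PySem.Set.add init := by
  induction s generalizing init with
  | nil => rfl
  | cons p t ih =>
      simp only [List.foldl_cons, List.flatMap_cons, List.foldl_append, ih, List.foldl_map]

theorem gen_eq (outcomes : List Int) (length : Int) :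
    gen_all_sequences outcomes length = gen_all_sequences_alt outcomes length := by
  have key : ∀ (n : Nat) (l : Int), l.toNat = n →
      gen_all_sequences outcomes l = gen_all_sequences_alt outcomes l := by
    intro n
    induction n with
    | zero =>
        intro l hl
        have h0 : l ≤ 0 := by omega
        have hr : PySem.List.pyRange 0 l 1 = [] := by
          simp [PySem.List.pyRange_one]
          omega
        rw [gen_all_sequences_alt]
        simp [gen_all_sequences, hr, h0]
    | succ m ih =>
        intro l hl
        have hpos : 0 < l := by omega
        have hrange : PySem.List.pyRange 0 l 1 = PySem.List.pyRange 0 (l - 1) 1 ++ [l - 1] := by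
          have := PySem.List.pyRange_one_succ_right (a := 0) (b := l - 1) (by omega)
          rw [show l - 1 + 1 = l from by omega] at this
          exact this
        have hprev : gen_all_sequences outcomes (l - 1) = gen_all_sequences_alt outcomes (l - 1) :=
          ih (l - 1) (by omega)
        rw [gen_all_sequences_alt]
        simp only [if_neg (by omega : ¬ l ≤ 0)]
        unfold gen_all_sequences
        rw [hrange, List.foldl_append]
        simp only [List.foldl_cons, List.foldl_nil]
        rw [show ((PySem.List.pyRange 0 (l-1) 1).foldl _ (PySem.Set.ofList [([] : List Int)])) = gen_all_sequences outcomes (l-1) from rfl]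
        rw [hprev, step_eq]; simp [PySem.Set.ofList_eq_foldl, PySem.Set.empty]
  exact key length.toNat length rfl

-- ===== VERDICT (by name: the statement is the Claim_ definition above) =====
theorem gen_all_sequences_spec : Claim_equal_gen_all_sequences := by
  intro outcomes length _
  unfold Spec_gen_all_sequences
  exact gen_eq outcomes length
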